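-- pv_equiv track=rewrite | github.com/leleoaraxa/araquem | scripts/quality/build_coverage_report.py | _rag_allowed_intents
-- ===== SOURCE A (Python) =====
-- from typing import Dict, Iterable, List, Mapping, MutableMapping, Optional, Tuple
--
-- def sorted_unique(items: Iterable[str]) -> List[str]:
--     return sorted({item for item in items if item is not None})
--
-- def _rag_allowed_intents(intents: List[str], routing: Mapping) -> List[str]:
--     allow_intents = routing.get("allow_intents") or []
--     deny_intents = routing.get("deny_intents") or []
--     if allow_intents:
--         allowed = [intent for intent in intents if intent in allow_intents and intent not in deny_intents]
--     else:
--         allowed = [intent for intent in intents if intent not in deny_intents]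
--     return sorted_unique(allowed)
-- ===== SOURCE B (Python) =====
-- def _rag_allowed_intents(intents, routing):
--     allow_intents = routing.get("allow_intents") or []
--     deny_intents = routing.get("deny_intents") or []
--     out = []
--     prev = None
--     for intent in sorted(i for i in intents if i is not None):
--         if intent == prev:
--             continue
--         prev = intent
--         if intent in deny_intents:
--             continue
--         if allow_intents and intent not in allow_intents:
--             continue
--         out.append(intent)
--     return out
-- ===== Notes on version B (the rewrite author's own statement) =====
-- stated objective: alternative
-- what changed: B sorts the intents FIRST and then makes one linear scan over the sorted list that skips adjacent duplicates via a prev sentinel and applies the deny/allow tests, emitting the result already in order; A filters with branch-selected comprehensions, deduplicates with a set afterwards, and only then sorts.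
import Mathlib
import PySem

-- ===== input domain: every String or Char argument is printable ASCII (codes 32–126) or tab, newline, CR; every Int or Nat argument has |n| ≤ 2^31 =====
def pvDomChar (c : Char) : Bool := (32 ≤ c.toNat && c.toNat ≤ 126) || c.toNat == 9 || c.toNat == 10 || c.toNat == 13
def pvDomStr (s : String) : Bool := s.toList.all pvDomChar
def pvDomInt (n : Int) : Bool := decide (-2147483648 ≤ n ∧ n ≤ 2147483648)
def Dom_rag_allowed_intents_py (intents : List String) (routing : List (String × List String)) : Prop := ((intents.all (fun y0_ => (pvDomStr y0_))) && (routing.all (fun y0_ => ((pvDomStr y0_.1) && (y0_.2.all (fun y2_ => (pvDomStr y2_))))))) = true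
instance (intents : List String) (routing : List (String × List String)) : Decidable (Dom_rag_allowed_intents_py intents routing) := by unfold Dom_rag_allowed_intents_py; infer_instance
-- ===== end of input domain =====

-- B sorts first, then one linear scan with a prev sentinel dedupes and filters, emitting the output in order (alternative; same results).


-- ===== PORT A =====
def rag_allowed_intents_py (intents : List String) (routing : List (String × List String)) : List String :=
  -- allow_intents = routing.get("allow_intents") or []  (missing key and empty list both give [])
  let allow_intents := (PySem.Dict.get? (PySem.Dict.mk routing) "allow_intents").getD []
  let deny_intents := (PySem.Dict.get? (PySem.Dict.mk routing) "deny_intents").getD []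
  let allowed :=
    if allow_intents ≠ [] then
      intents.filter (fun intent => allow_intents.contains intent && !(deny_intents.contains intent))
    else
      intents.filter (fun intent => !(deny_intents.contains intent))
  -- sorted_unique(allowed) = sorted({item for item in allowed if item is not None});
  -- the arguments are List String, so the 'is not None' filter keeps every element.
  PySem.List.sorted (PySem.Set.ofList allowed) (fun x => x) false

-- ===== PORT B =====
def rag_allowed_intents_py_alt (intents : List String) (routing : List (String × List String)) : List String :=
  let allow_intents := (PySem.Dict.get? (PySem.Dict.mk routing) "allow_intents").getD []
  let deny_intents := (PySem.Dict.get? (PySem.Dict.mk routing) "deny_intents").getD []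
  -- for intent in sorted(i for i in intents if i is not None): the arguments are List String,
  -- so the 'is not None' generator filter keeps every element; prev = None is Option.none.
  let ys := PySem.List.sorted intents (fun x => x) false
  let s := ys.foldl (fun s intent =>
      if s.1 = some intent then s                                   -- if intent == prev: continue
      else if deny_intents.contains intent then (some intent, s.2)  -- if intent in deny_intents: continue
      else if allow_intents ≠ [] && !(allow_intents.contains intent) then (some intent, s.2)
      else (some intent, s.2 ++ [intent]))                          -- out.append(intent)
    ((none : Option String), ([] : List String))
  s.2

-- ===== PRECONDITION & SPEC =====
def Spec_rag_allowed_intents_py (intents : List String) (routing : List (String × List String)) (out : List String) : Prop := out = rag_allowed_intents_py_alt intents routing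
instance (intents : List String) (routing : List (String × List String)) (out : List String) : Decidable (Spec_rag_allowed_intents_py intents routing out) := by unfold Spec_rag_allowed_intents_py; infer_instance

-- ===== CLAIM =====
def Claim_equal_rag_allowed_intents_py : Prop := ∀ (intents : List String) (routing : List (String × List String)), Dom_rag_allowed_intents_py intents routing → Spec_rag_allowed_intents_py intents routing (rag_allowed_intents_py intents routing)

-- ===== LEMMAS AND PROOFS =====

-- Proof-side recursive reading of B's scan: skip an element equal to prev, else keep it iff `keep`.
def pvDedupFilter (keep : String → Bool) : Option String → List String → List String
  | _, [] => []
  | prev, x :: t =>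
    if prev = some x then pvDedupFilter keep prev t
    else (if keep x then [x] else []) ++ pvDedupFilter keep (some x) t

-- B's fold computes pvDedupFilter (second component), for the predicate combining deny/allow.
theorem pvFoldl_eq_dedupFilter (allow deny : List String) :
    ∀ (ys : List String) (prev : Option String) (acc : List String),
    (ys.foldl (fun s intent =>
      if s.1 = some intent then s
      else if deny.contains intent then (some intent, s.2)
      else if allow ≠ [] && !(allow.contains intent) then (some intent, s.2)
      else (some intent, s.2 ++ [intent])) (prev, acc)).2
    = acc ++ pvDedupFilter
        (fun x => !(deny.contains x) && (decide (allow = []) || allow.contains x)) prev ys := by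
  intro ys
  induction ys with
  | nil => intro prev acc; simp [pvDedupFilter]
  | cons x t ih =>
    intro prev acc
    rw [List.foldl_cons]
    by_cases h1 : prev = some x
    · rw [if_pos h1, ih]
      simp [pvDedupFilter, h1]
    · rw [if_neg h1]
      by_cases h2 : deny.contains x = true
      · have h2m : x ∈ deny := by simpa using h2
        rw [if_pos h2, ih]
        simp [pvDedupFilter, h1, h2m]
      · rw [Bool.not_eq_true] at h2
        have h2m : x ∉ deny := by simpa using h2
        rw [h2, if_neg (by simp)]
        by_cases h3 : allow = []
        · rw [if_neg (by simp [h3]), ih]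
          simp [pvDedupFilter, h1, h2m, h3]
        · by_cases h4 : allow.contains x = true
          · have h4m : x ∈ allow := by simpa using h4
            rw [if_neg (by simp [h4m]), ih]
            simp [pvDedupFilter, h1, h2m, h3, h4m]
          · rw [Bool.not_eq_true] at h4
            have h4m : x ∉ allow := by simpa using h4
            rw [if_pos (by simp [h3, h4m]), ih]
            simp [pvDedupFilter, h1, h2m, h3, h4m]

-- On a ≤-sorted list whose elements dominate prev, the scan's output is the strictly sorted
-- list of exactly the kept elements other than prev.
theorem pvDedupFilter_sorted (keep : String → Bool) :
    ∀ (t : List String), t.Pairwise (· ≤ ·) →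
    ∀ (prev : Option String), (∀ z ∈ t, ∀ v, prev = some v → v ≤ z) →
    (∀ y, y ∈ pvDedupFilter keep prev t ↔ y ∈ t ∧ prev ≠ some y ∧ keep y = true) ∧
    (pvDedupFilter keep prev t).Pairwise (· < ·) := by
  intro t
  induction t with
  | nil => intro _ prev _; simp [pvDedupFilter]
  | cons x rest ih =>
    intro hs prev hprev
    rw [List.pairwise_cons] at hs
    obtain ⟨hxle, hrest⟩ := hs
    by_cases h1 : prev = some x
    · -- skipped head: recurse with the same prev = some x
      subst h1
      have hcond : ∀ z ∈ rest, ∀ v, (some x : Option String) = some v → v ≤ z := by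
        intro z hz v hv
        obtain rfl := Option.some.inj hv
        exact hxle z hz
      obtain ⟨hmem, hpw⟩ := ih hrest (some x) hcond
      have hred : pvDedupFilter keep (some x) (x :: rest) = pvDedupFilter keep (some x) rest := by
        simp [pvDedupFilter]
      refine ⟨?_, by rw [hred]; exact hpw⟩
      intro y
      rw [hred, hmem y]
      constructor
      · rintro ⟨hy, hne, hk⟩
        exact ⟨List.mem_cons_of_mem _ hy, hne, hk⟩
      · rintro ⟨hy, hne, hk⟩
        rcases List.mem_cons.mp hy with rfl | hy'
        · exact absurd rfl hne
        · exact ⟨hy', hne, hk⟩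
    · -- kept head position: recurse with prev' = some x
      have hcond : ∀ z ∈ rest, ∀ v, (some x : Option String) = some v → v ≤ z := by
        intro z hz v hv
        obtain rfl := Option.some.inj hv
        exact hxle z hz
      obtain ⟨hmem, hpw⟩ := ih hrest (some x) hcond
      have hx_lt : ∀ y ∈ pvDedupFilter keep (some x) rest, x < y := by
        intro y hy
        obtain ⟨hy_rest, hy_ne, _⟩ := (hmem y).mp hy
        exact lt_of_le_of_ne (hxle y hy_rest) (fun h => hy_ne (by rw [h]))
      have hprev_ne : ∀ y ∈ rest, x ≠ y → prev ≠ some y := by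
        intro y hy hxy h
        have h1' : y ≤ x := hprev x (List.mem_cons_self) y h
        have h2' : x ≤ y := hxle y hy
        exact hxy (le_antisymm h2' h1')
      by_cases hk : keep x = true
      · have hred : pvDedupFilter keep prev (x :: rest) = x :: pvDedupFilter keep (some x) rest := by
          simp [pvDedupFilter, h1, hk]
        constructor
        · intro y
          rw [hred, List.mem_cons]
          constructor
          · rintro (rfl | hy)
            · exact ⟨List.mem_cons_self, fun h => h1 h, hk⟩
            · obtain ⟨hy_rest, hy_ne, hk'⟩ := (hmem y).mp hy
              refine ⟨List.mem_cons_of_mem _ hy_rest, ?_, hk'⟩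
              exact hprev_ne y hy_rest (fun h => hy_ne (by rw [h]))
          · rintro ⟨hy, hne, hk'⟩
            rcases List.mem_cons.mp hy with rfl | hy'
            · exact Or.inl rfl
            · by_cases hyx : y = x
              · exact Or.inl hyx
              · exact Or.inr ((hmem y).mpr ⟨hy', fun h => hyx (Option.some.inj h).symm, hk'⟩)
        · rw [hred]
          exact List.pairwise_cons.mpr ⟨hx_lt, hpw⟩
      · have hred : pvDedupFilter keep prev (x :: rest) = pvDedupFilter keep (some x) rest := by
          simp [pvDedupFilter, h1, hk]
        refine ⟨?_, by rw [hred]; exact hpw⟩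
        intro y
        rw [hred, hmem y]
        constructor
        · rintro ⟨hy_rest, hy_ne, hk'⟩
          refine ⟨List.mem_cons_of_mem _ hy_rest, ?_, hk'⟩
          exact hprev_ne y hy_rest (fun h => hy_ne (by rw [h]))
        · rintro ⟨hy, hne, hk'⟩
          rcases List.mem_cons.mp hy with rfl | hy'
          · exact absurd hk' hk
          · refine ⟨hy', ?_, hk'⟩
            intro h
            obtain rfl := Option.some.inj h
            exact hk hk'

-- ===== VERDICT =====
theorem rag_allowed_intents_py_spec : Claim_equal_rag_allowed_intents_py := by
  intro intents routing _
  unfold Spec_rag_allowed_intents_py rag_allowed_intents_py rag_allowed_intents_py_alt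
  set allow := (PySem.Dict.get? (PySem.Dict.mk routing) "allow_intents").getD [] with hallow
  set deny := (PySem.Dict.get? (PySem.Dict.mk routing) "deny_intents").getD [] with hdeny
  simp only []
  rw [pvFoldl_eq_dedupFilter]
  set keep : String → Bool :=
    fun x => !(deny.contains x) && (decide (allow = []) || allow.contains x) with hkeep
  set ys := PySem.List.sorted intents (fun x => x) false with hys
  have hsorted : ys.Pairwise (· ≤ ·) := PySem.List.sorted_pairwise intents (fun x => x)
  obtain ⟨hmem, hpw⟩ :=
    pvDedupFilter_sorted keep ys hsorted none (by intro z _ v hv; cases hv)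
  set res := pvDedupFilter keep none ys with hres
  have hnodup : res.Nodup := hpw.imp (fun h => ne_of_lt h)
  have hfilter :
      (if allow ≠ [] then
        intents.filter (fun intent => allow.contains intent && !(deny.contains intent))
      else
        intents.filter (fun intent => !(deny.contains intent))) = intents.filter keep := by
    by_cases h : allow = []
    · simp only [h, ne_eq, not_true_eq_false, if_false]
      apply List.filter_congr
      intro x _
      simp [hkeep, h]
    · simp only [ne_eq, h, not_false_eq_true, if_true]
      apply List.filter_congr
      intro x _
      simp [hkeep, h, Bool.and_comm]
  rw [hfilter, List.nil_append]
  apply PySem.List.sorted_eq_of_perm_of_pairwise_lt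
  · refine (List.perm_ext_iff_of_nodup hnodup (PySem.Set.nodup_ofList _)).mpr ?_
    intro y
    rw [PySem.Set.mem_ofList, List.mem_filter, hmem y]
    constructor
    · rintro ⟨hy, _, hk⟩
      exact ⟨(PySem.List.mem_sorted _ _ _ _).mp hy, hk⟩
    · rintro ⟨hy, hk⟩
      exact ⟨(PySem.List.mem_sorted _ _ _ _).mpr hy, by simp, hk⟩
  · exact hpw
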